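-- pv_equiv track=rewrite | github.com/BearYep/Encryption-Project | Encryption/rotate.py | create_array_from_plain
-- ===== SOURCE A (Python) =====
-- def create_array_from_plain(input_string):
--
--     characters = list(input_string)
--     redundant = ""
--     # 計算需要的列數
--     if(len(characters) % 2 == 1):
--         redundant = characters[-1]
--         characters.pop()
--         num_rows = int(len(characters) / 2)
--     else:
--         num_rows = int(len(characters) / 2)
--
--     # 初始化二維陣列
--     array = [[None for _ in range(2)] for _ in range(num_rows)]
--
--     row_count = 0
--     for i in range(0, len(characters), 2):
--         array[row_count][0] = characters[i]
--         if i + 1 < len(characters) and characters[i + 1] is not None: #檢查合法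
--             array[row_count][1] = characters[i + 1]
--         row_count += 1
--
--     return array, redundant
-- ===== SOURCE B (Python) =====
-- def create_array_from_plain(input_string):
--     evens = input_string[::2]
--     odds = input_string[1::2]
--     array = [[a, b] for a, b in zip(evens, odds)]
--     redundant = input_string[-1] if len(input_string) % 2 == 1 else ""
--     return array, redundant
-- ===== Notes on version B (the rewrite author's own statement) =====
-- stated objective: idiomatic
-- what changed: Replaces A's pre-allocated None grid mutated by an index loop with a row counter by two strided slices (s[::2], s[1::2]) zipped into rows in one comprehension; the odd leftover is read directly from s[-1].
import Mathlib
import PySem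

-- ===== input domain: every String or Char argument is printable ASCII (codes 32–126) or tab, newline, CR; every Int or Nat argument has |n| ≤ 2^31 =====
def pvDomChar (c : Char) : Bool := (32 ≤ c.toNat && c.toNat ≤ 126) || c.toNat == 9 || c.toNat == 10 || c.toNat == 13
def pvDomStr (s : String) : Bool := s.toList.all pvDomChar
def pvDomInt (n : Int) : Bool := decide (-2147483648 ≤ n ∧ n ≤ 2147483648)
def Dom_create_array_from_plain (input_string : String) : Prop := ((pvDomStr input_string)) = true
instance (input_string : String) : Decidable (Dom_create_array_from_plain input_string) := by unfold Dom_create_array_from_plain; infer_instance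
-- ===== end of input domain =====

-- B builds the rows by zipping the two strided slices s[::2] and s[1::2] instead of
-- A's index loop writing into a pre-allocated None grid; same return value, idiomatic objective.

-- ===== PORT A =====
-- the body of A's for-loop over range(0, len(characters), 2); st = (array, row_count).
-- (A's extra test 'characters[i+1] is not None' is always true — the list holds strings, never None —
--  so only the 'i + 1 < len(characters)' conjunct remains.)
def pvStepA (characters : List String) (st : List (List (Option String)) × Nat) (i : Int) :
    List (List (Option String)) × Nat :=
  let a1 := st.1.modify st.2 (fun row => row.set 0 (some (PySem.List.pyGetD characters i "")))
  let a2 := if i + 1 < (characters.length : Int) then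
      a1.modify st.2 (fun row => row.set 1 (some (PySem.List.pyGetD characters (i + 1) "")))
    else a1
  (a2, st.2 + 1)

def create_array_from_plain (input_string : String) : List (List (Option String)) × String :=
  let characters := input_string.toList.map (fun c => String.ofList [c])
  -- odd branch: redundant = characters[-1], then characters.pop() (drop the last element)
  let (redundant, characters, num_rows) :=
    if characters.length % 2 == 1 then
      ((PySem.List.pyGet? characters (-1)).getD "", characters.dropLast, characters.dropLast.length / 2)
    else
      ("", characters, characters.length / 2)
  let array : List (List (Option String)) :=
    List.replicate num_rows (List.replicate 2 (none : Option String))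
  let final := (PySem.List.pyRange 0 (characters.length : Int) 2).foldl (pvStepA characters) (array, 0)
  (final.1, redundant)

-- ===== PORT B =====
def create_array_from_plain_alt (input_string : String) : List (List (Option String)) × String :=
  let cs := input_string.toList.map (fun c => String.ofList [c])
  let evens := (PySem.List.slice? cs none none 2).getD []        -- input_string[::2]
  let odds := (PySem.List.slice? cs (some 1) none 2).getD []     -- input_string[1::2]
  let array := (evens.zip odds).map (fun p => [some p.1, some p.2])
  let redundant := if cs.length % 2 == 1 then (PySem.List.pyGet? cs (-1)).getD "" else ""
  (array, redundant)

-- ===== PRECONDITION & SPEC =====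
def Spec_create_array_from_plain (input_string : String) (out : List (List (Option String)) × String) : Prop := out = create_array_from_plain_alt input_string
instance (input_string : String) (out : List (List (Option String)) × String) : Decidable (Spec_create_array_from_plain input_string out) := by unfold Spec_create_array_from_plain; infer_instance

-- ===== CLAIM (what is proved, stated in full; the proofs are below) =====
def Claim_equal_create_array_from_plain : Prop := ∀ (input_string : String), Dom_create_array_from_plain input_string → Spec_create_array_from_plain input_string (create_array_from_plain input_string)

-- ===== LEMMAS AND PROOFS =====

-- proof-side normal form: consecutive characters paired into two-element rows
def pairRows {α : Type} : List α → List (List (Option α))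
  | a :: b :: t => [some a, some b] :: pairRows t
  | _ => []

-- proof-side value of a [::2] slice
def everyOther {α : Type} : List α → List α
  | [] => []
  | [a] => [a]
  | a :: _ :: t => a :: everyOther t

lemma everyOther_core {α : Type} (cs : List α) :
    List.filterMap (fun k : Nat => cs[2 * k]?) (List.range ((cs.length + 1) / 2)) = everyOther cs := by
  induction cs using everyOther.induct with
  | case1 => simp [everyOther]
  | case2 a => simp [everyOther, List.range_succ]
  | case3 a b t ih =>
      have h : ((a :: b :: t).length + 1) / 2 = (t.length + 1) / 2 + 1 := by
        simp; omega
      rw [h, List.range_succ_eq_map, List.filterMap_cons, List.filterMap_map]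
      simp only [Function.comp]
      have h2 : ∀ k : Nat, (a :: b :: t)[2 * (k + 1)]? = t[2 * k]? := by
        intro k
        have : 2 * (k + 1) = 2 * k + 1 + 1 := by omega
        rw [this]; simp
      simp only [h2]
      simp [everyOther, ih]

lemma slice_evens {α : Type} (cs : List α) :
    (PySem.List.slice? cs none none 2).getD [] = everyOther cs := by
  unfold PySem.List.slice? PySem.List.sliceIndices
  norm_num
  rcases cs with _ | ⟨x, t⟩
  · simp [everyOther]
  · rw [if_pos (show 0 < (x :: t).length by simp)]
    have hcount : ((((x :: t).length : Int) + 2 - 1) / 2).toNat = ((x :: t).length + 1) / 2 := by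
      omega
    rw [hcount]
    calc List.filterMap (fun k : Nat => (x :: t)[((2 : Int) * (k : Int)).toNat]?)
            (List.range (((x :: t).length + 1) / 2))
        = List.filterMap (fun k : Nat => (x :: t)[2 * k]?)
            (List.range (((x :: t).length + 1) / 2)) := by
          apply List.filterMap_congr; intro k _
          rw [show ((2 : Int) * (k : Int)).toNat = 2 * k by omega]
      _ = everyOther (x :: t) := everyOther_core _

lemma slice_odds {α : Type} (cs : List α) :
    (PySem.List.slice? cs (some 1) none 2).getD [] = everyOther cs.tail := by
  unfold PySem.List.slice? PySem.List.sliceIndices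
  norm_num
  rcases cs with _ | ⟨x, t⟩
  · simp [everyOther]
  · by_cases ht : t = []
    · subst ht
      norm_num [everyOther]
    · have hmin : min (1 : Int) ((x :: t).length : Int) = 1 := by
        simp
      rw [hmin]
      have hlt : 1 < (x :: t).length := by
        have : 0 < t.length := List.length_pos_iff.mpr ht
        simp; omega
      rw [if_pos hlt]

      have hcount : ((((x :: t).length : Int) - 1 + 2 - 1) / 2).toNat = (t.length + 1) / 2 := by
        simp; omega
      rw [hcount]
      calc List.filterMap (fun k : Nat => (x :: t)[((1 : Int) + (2 : Int) * (k : Int)).toNat]?)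
              (List.range ((t.length + 1) / 2))
          = List.filterMap (fun k : Nat => t[2 * k]?) (List.range ((t.length + 1) / 2)) := by
            apply List.filterMap_congr; intro k _
            rw [show ((1 : Int) + (2 : Int) * (k : Int)).toNat = 2 * k + 1 by omega]
            simp
        _ = everyOther t := everyOther_core _

lemma zip_pairRows {α : Type} (cs : List α) :
    ((everyOther cs).zip (everyOther cs.tail)).map (fun p => [some p.1, some p.2]) = pairRows cs := by
  induction cs using everyOther.induct with
  | case1 => simp [everyOther, pairRows]
  | case2 a => simp [everyOther, pairRows]
  | case3 a b t ih =>
      rcases t with _ | ⟨c, t'⟩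
      · simp [everyOther, pairRows]
      · simpa [everyOther, pairRows] using ih

lemma pairRows_dropLast_of_odd {α : Type} (cs : List α) (h : cs.length % 2 = 1) :
    pairRows cs.dropLast = pairRows cs := by
  induction cs using everyOther.induct with
  | case1 => simp at h
  | case2 a => simp [pairRows]
  | case3 a b t ih =>
      have ht : t ≠ [] := by
        intro he; subst he; simp at h
      have h' : t.length % 2 = 1 := by simp at h; omega
      have : (a :: b :: t).dropLast = a :: b :: t.dropLast := by
        simp [List.dropLast_cons_of_ne_nil, ht]
      rw [this]
      simp [pairRows, ih h']

-- pyRange with step 2: structural cons/nil forms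
lemma pyRange2_nil (a b : Int) (h : b ≤ a) : PySem.List.pyRange a b 2 = [] := by
  rw [PySem.List.pyRange_of_pos a b (by norm_num)]
  rw [if_neg (by omega)]
  simp

lemma pyRange2_cons (a b : Int) (h : a < b) :
    PySem.List.pyRange a b 2 = a :: PySem.List.pyRange (a + 2) b 2 := by
  rw [PySem.List.pyRange_of_pos a b (by norm_num),
      PySem.List.pyRange_of_pos (a + 2) b (by norm_num)]
  rw [if_pos h]
  by_cases h2 : a + 2 < b
  · rw [if_pos h2]
    have hc : ((b - a + 2 - 1) / 2).toNat = ((b - (a + 2) + 2 - 1) / 2).toNat + 1 := by omega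
    rw [hc, List.range_succ_eq_map, List.map_cons, List.map_map]
    congr 1
    · norm_num
    · apply List.map_congr_left
      intro k _
      simp [Function.comp]
      ring
  · rw [if_neg h2]
    have hc : ((b - a + 2 - 1) / 2).toNat = 1 := by omega
    rw [hc]
    simp

lemma modify_eq_take_cons_drop {α : Type} (g : List α) (rc : Nat) (f : α → α) (h : rc < g.length) :
    g.modify rc f = g.take rc ++ f g[rc] :: g.drop (rc + 1) := by
  induction g generalizing rc with
  | nil => simp at h
  | cons x t ih =>
      cases rc with
      | zero => simp [List.modify]
      | succ n =>
          have hm : (x :: t).modify (n + 1) f = x :: t.modify n f := by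
            simp
          rw [hm, ih n (by simpa using h)]
          simp

lemma double_modify {α : Type} (g : List (List (Option α))) (rc : Nat) (x y : α)
    (h : rc < g.length) (hrow : g[rc].length = 2) :
    ((g.modify rc (fun row => row.set 0 (some x))).modify rc (fun row => row.set 1 (some y))) =
      g.take rc ++ [some x, some y] :: g.drop (rc + 1) := by
  obtain ⟨u, v, huv⟩ := List.length_eq_two.mp hrow
  rw [modify_eq_take_cons_drop g rc _ h, huv,
      show [u, v].set 0 (some x) = [some x, v] from rfl]
  have hlen : (g.take rc).length = rc := by simp [List.length_take]; omega
  have h2 : rc < (g.take rc ++ [some x, v] :: g.drop (rc + 1)).length := by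
    simp; omega
  rw [modify_eq_take_cons_drop _ rc _ h2]
  have hget : (g.take rc ++ [some x, v] :: g.drop (rc + 1))[rc] = [some x, v] := by
    rw [List.getElem_append_right (by omega)]
    simp [hlen]
  have htake : (g.take rc ++ [some x, v] :: g.drop (rc + 1)).take rc = g.take rc := by
    rw [List.take_append_of_le_length (by omega)]
    simp [List.take_take]
  have hdrop : (g.take rc ++ [some x, v] :: g.drop (rc + 1)).drop (rc + 1) = g.drop (rc + 1) := by
    rw [show rc + 1 = (g.take rc).length + 1 by omega]
    rw [List.drop_append]
    simp
  rw [hget, htake, hdrop,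
      show [some x, v].set 1 (some y) = [some x, some y] from rfl]

lemma loopA (cs : List String) (m : Nat) : ∀ (rc : Nat) (g : List (List (Option String))),
    cs.length = 2 * rc + 2 * m → g.length = rc + m → (∀ row ∈ g, row.length = 2) →
    (PySem.List.pyRange (2 * (rc : Int)) (cs.length : Int) 2).foldl (pvStepA cs) (g, rc) =
      (g.take rc ++ pairRows (cs.drop (2 * rc)), rc + m) := by
  induction m with
  | zero =>
      intro rc g hlen hg hrow
      rw [pyRange2_nil _ _ (by omega)]
      simp only [List.foldl_nil, Prod.mk.injEq]
      constructor
      · rw [List.take_of_length_le (by omega)]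
        have : cs.drop (2 * rc) = [] := by
          apply List.drop_eq_nil_of_le; omega
        rw [this]
        simp [pairRows]
      · omega
  | succ m ih =>
      intro rc g hlen hg hrow
      rw [pyRange2_cons _ _ (by push_cast; omega)]
      rw [List.foldl_cons]
      have hrc : rc < g.length := by omega
      have h0 : 2 * rc < cs.length := by omega
      have h1 : 2 * rc + 1 < cs.length := by omega
      -- evaluate one step of the loop
      have hstep : pvStepA cs (g, rc) (2 * (rc : Int)) =
          (g.take rc ++ [some cs[2 * rc], some cs[2 * rc + 1]] :: g.drop (rc + 1), rc + 1) := by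
        unfold pvStepA
        simp only []
        rw [if_pos (by push_cast; omega)]
        have e0 : PySem.List.pyGetD cs (2 * (rc : Int)) "" = cs[2 * rc] := by
          rw [PySem.List.pyGetD_eq_getElem _ _ (by push_cast; omega) (by push_cast; omega)]
          congr 1
        have e1 : PySem.List.pyGetD cs (2 * (rc : Int) + 1) "" = cs[2 * rc + 1] := by
          rw [PySem.List.pyGetD_eq_getElem _ _ (by push_cast; omega) (by push_cast; omega)]
          congr 1
        rw [e0, e1]
        rw [double_modify g rc _ _ hrc (hrow _ (List.getElem_mem hrc))]
      rw [show (2 * (rc : Int) + 2) = 2 * ((rc + 1 : Nat) : Int) by push_cast; ring]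
      rw [hstep]
      set g' := g.take rc ++ [some cs[2 * rc], some cs[2 * rc + 1]] :: g.drop (rc + 1) with hg'
      have hg'len : g'.length = (rc + 1) + m := by
        simp [hg']; omega
      have hg'row : ∀ row ∈ g', row.length = 2 := by
        intro row hmem
        simp [hg'] at hmem
        rcases hmem with h | h | h
        · exact hrow _ (List.mem_of_mem_take h)
        · simp [h]
        · exact hrow _ (List.mem_of_mem_drop h)
      rw [ih (rc + 1) g' (by omega) hg'len hg'row]
      simp only [Prod.mk.injEq]
      constructor
      · -- g'.take (rc+1) ++ pairRows (cs.drop (2*(rc+1))) = g.take rc ++ pairRows (cs.drop (2*rc))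
        have hlen' : (g.take rc).length = rc := by simp; omega
        have ht : g'.take (rc + 1) = g.take rc ++ [[some cs[2 * rc], some cs[2 * rc + 1]]] := by
          rw [hg', show rc + 1 = (g.take rc).length + 1 by omega]
          rw [List.take_append]
          simp
        rw [ht]
        have hdrop : cs.drop (2 * rc) = cs[2 * rc] :: cs[2 * rc + 1] :: cs.drop (2 * (rc + 1)) := by
          have h11 : 2 * rc + 1 + 1 = 2 * (rc + 1) := by omega
          rw [List.drop_eq_getElem_cons h0, List.drop_eq_getElem_cons h1, h11]
        rw [hdrop]
        simp [pairRows]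
      · omega

lemma main_A_eval (cs : List String) (h2 : cs.length % 2 = 0) :
    ((PySem.List.pyRange 0 (cs.length : Int) 2).foldl (pvStepA cs)
      (List.replicate (cs.length / 2) (List.replicate 2 (none : Option String)), 0)).1 = pairRows cs := by
  have := loopA cs (cs.length / 2) 0 (List.replicate (cs.length / 2) (List.replicate 2 none))
    (by omega) (by simp) (by intro row hr; simp at hr; simp [hr])
  simp only [Nat.mul_zero, Nat.cast_zero, Int.mul_zero, List.take_zero, List.drop_zero,
    List.nil_append, Nat.zero_add] at this
  rw [this]

-- ===== VERDICT (by name: the statement is the Claim_ definition above) =====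
theorem create_array_from_plain_spec : Claim_equal_create_array_from_plain := by
  intro input_string _
  unfold Spec_create_array_from_plain create_array_from_plain create_array_from_plain_alt
  simp only []
  set cs := input_string.toList.map (fun c => String.ofList [c]) with hcs
  rw [slice_evens, slice_odds, zip_pairRows]
  by_cases hodd : cs.length % 2 = 1
  · rw [if_pos (by simpa using hodd), if_pos (by simpa using hodd)]
    simp only []
    have hd2 : cs.dropLast.length % 2 = 0 := by simp; omega
    rw [main_A_eval _ hd2, pairRows_dropLast_of_odd _ hodd]
  · rw [if_neg (by simpa using hodd), if_neg (by simpa using hodd)]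
    simp only []
    rw [main_A_eval _ (by omega)]
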